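-- pv_equiv track=rewrite | github.com/lanl/hippynn | hippynn/InferenceTools.py | N_to_m_batches
-- ===== SOURCE A (Python) =====
-- def N_to_m_batches(N, m):
--     q = N // m
--     r = N % m
--     batch_indices = []
--     start = 0
--     l = list(range(N))
--     for i in range(m):
--         end = start + q + (1 if i<r else 0)
--         batch_indices.append((i, l[start:end]))
--         start = end
--
--     return batch_indices
-- ===== SOURCE B (Python) =====
-- def N_to_m_batches(N, m):
--     q, r = divmod(N, m)
--     bound = lambda k: k * q + min(k, r)
--     return [(i, list(range(bound(i), bound(i + 1)))) for i in range(m)]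
-- ===== Notes on version B (the rewrite author's own statement) =====
-- stated objective: simpler
-- what changed: Replaces A's prebuilt list(range(N)) plus the sequential start/end accumulator with a per-index closed-form boundary bound(k)=k*q+min(k,r), so each batch is an independent range(bound(i), bound(i+1)) computed directly from i.
-- outside the precondition, e.g. on N_to_m_batches(10, 0): A raises ZeroDivisionError, B raises ZeroDivisionError
import Mathlib
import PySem

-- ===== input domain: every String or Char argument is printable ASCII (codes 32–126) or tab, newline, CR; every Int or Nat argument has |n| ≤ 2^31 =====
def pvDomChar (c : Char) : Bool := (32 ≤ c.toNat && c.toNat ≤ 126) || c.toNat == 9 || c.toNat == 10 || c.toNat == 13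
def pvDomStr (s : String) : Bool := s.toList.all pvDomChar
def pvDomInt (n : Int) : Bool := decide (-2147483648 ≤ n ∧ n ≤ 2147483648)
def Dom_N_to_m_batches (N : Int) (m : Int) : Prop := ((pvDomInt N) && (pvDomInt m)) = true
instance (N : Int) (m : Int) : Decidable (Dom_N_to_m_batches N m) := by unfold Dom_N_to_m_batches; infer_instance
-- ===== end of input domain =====

-- B replaces A's prebuilt list + running start/end accumulator by a closed-form
-- batch boundary bound(k) = k*q + min(k, r), building each batch directly as a range (objective: simpler).

-- ===== PORT A =====
-- literal transliteration of A: running (batch_indices, start) state, slicing a prebuilt list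
def N_to_m_batches (N : Int) (m : Int) : List (Int × List Int) :=
  let q := PySem.Int.floordiv N m
  let r := PySem.Int.mod N m
  let l := PySem.List.pyRange 0 N 1
  ((PySem.List.pyRange 0 m 1).foldl
    (fun (acc : List (Int × List Int) × Int) i =>
      let e := acc.2 + q + (if i < r then (1:Int) else 0)
      (acc.1 ++ [(i, PySem.List.slice l (some acc.2) (some e))], e))
    (([] : List (Int × List Int)), (0:Int))).1

-- ===== PORT B =====
-- literal transliteration of B: per-index closed-form boundaries, no accumulator
def N_to_m_batches_alt (N : Int) (m : Int) : List (Int × List Int) :=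
  let q := PySem.Int.floordiv N m
  let r := PySem.Int.mod N m
  let bound := fun (k : Int) => k * q + min k r
  (PySem.List.pyRange 0 m 1).map (fun i =>
    (i, PySem.List.pyRange (bound i) (bound (i + 1)) 1))

-- ===== PRECONDITION & SPEC =====
-- Pre_ excludes exactly m = 0, on which Python's '//' raises ZeroDivisionError
def Pre_N_to_m_batches (N : Int) (m : Int) : Prop := m ≠ 0
instance (N : Int) (m : Int) : Decidable (Pre_N_to_m_batches N m) := by unfold Pre_N_to_m_batches; infer_instance
def pvWitness_N_to_m_batches : Int × Int := (10, 3)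

def Spec_N_to_m_batches (N : Int) (m : Int) (out : List (Int × List Int)) : Prop := out = N_to_m_batches_alt N m
instance (N : Int) (m : Int) (out : List (Int × List Int)) : Decidable (Spec_N_to_m_batches N m out) := by unfold Spec_N_to_m_batches; infer_instance

-- ===== CLAIM (what is proved, stated in full; the proofs are below) =====
def Claim_equal_N_to_m_batches : Prop := ∀ (N : Int) (m : Int), Dom_N_to_m_batches N m → Pre_N_to_m_batches N m → Spec_N_to_m_batches N m (N_to_m_batches N m)

-- ===== LEMMAS AND PROOFS =====

-- A's loop, characterized: after the first j iterations the running start is bound(j)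
-- and the accumulated list is the map of per-index slices with closed-form boundaries.
theorem loopA (q r : Int) (hr : 0 ≤ r) (l : List Int) (j : Nat) :
    ((PySem.List.pyRange 0 (j : Int) 1).foldl
      (fun (acc : List (Int × List Int) × Int) i =>
        let e := acc.2 + q + (if i < r then (1:Int) else 0)
        (acc.1 ++ [(i, PySem.List.slice l (some acc.2) (some e))], e))
      (([] : List (Int × List Int)), (0:Int)))
    = ((PySem.List.pyRange 0 (j : Int) 1).map (fun i =>
        (i, PySem.List.slice l (some (i * q + min i r)) (some ((i + 1) * q + min (i + 1) r)))),
       (j : Int) * q + min (j : Int) r) := by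
  induction j with
  | zero => simp [PySem.List.pyRange_one_eq_nil, min_eq_left hr]
  | succ j ih =>
    have hc : ((j + 1 : Nat) : Int) = (j : Int) + 1 := by push_cast; ring
    rw [hc, PySem.List.pyRange_one_succ_right (by positivity), List.foldl_append,
      List.map_append, ih]
    simp only [List.foldl_cons, List.foldl_nil, List.map_cons, List.map_nil]
    have hend : (j : Int) * q + min (j : Int) r + q + (if (j : Int) < r then (1:Int) else 0)
        = ((j : Int) + 1) * q + min ((j : Int) + 1) r := by
      by_cases h : (j : Int) < r
      · rw [if_pos h, min_eq_left (by omega), min_eq_left (by omega)]; ring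
      · rw [if_neg h, min_eq_right (by omega), min_eq_right (by omega)]; ring
    rw [hend]

-- a slice of range(0, N) with in-range nonnegative bounds is range(s, e)
theorem slice_range (N s e : Int) (hs : 0 ≤ s) (he0 : 0 ≤ e) (heN : e ≤ N) :
    PySem.List.slice (PySem.List.pyRange 0 N 1) (some s) (some e)
      = PySem.List.pyRange s e 1 := by
  rcases lt_or_ge e s with hlt | hle
  · -- empty on both sides
    rw [PySem.List.pyRange_one_eq_nil (le_of_lt hlt)]
    rw [PySem.List.slice_toNat _ hs he0]
    have : e.toNat - s.toNat = 0 := by omega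
    simp [this]
  · have hsplit1 : PySem.List.pyRange 0 N 1
        = PySem.List.pyRange 0 s 1 ++ (PySem.List.pyRange s e 1 ++ PySem.List.pyRange e N 1) := by
      rw [← PySem.List.pyRange_one_append s e N hle heN,
        ← PySem.List.pyRange_one_append 0 s N hs (le_trans hle heN)]
    have hls : (PySem.List.pyRange 0 s 1).length = s.toNat := by
      rw [PySem.List.length_pyRange_one]; omega
    have hle2 : (PySem.List.pyRange s e 1).length = e.toNat - s.toNat := by
      rw [PySem.List.length_pyRange_one]; omega
    rw [PySem.List.slice_toNat _ hs he0, hsplit1]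
    have hdrop : List.drop s.toNat
        (PySem.List.pyRange 0 s 1 ++ (PySem.List.pyRange s e 1 ++ PySem.List.pyRange e N 1))
        = PySem.List.pyRange s e 1 ++ PySem.List.pyRange e N 1 := by
      rw [← hls]; exact List.drop_left
    rw [hdrop, show e.toNat - s.toNat = (PySem.List.pyRange s e 1).length from hle2.symm]
    exact List.take_left

-- a slice of the empty list is empty
theorem slice_nil (a b : Int) :
    PySem.List.slice ([] : List Int) (some a) (some b) = [] := by
  apply List.eq_nil_of_length_eq_zero
  rw [PySem.List.length_slice]
  have h1 := PySem.List.clampIdx_le (n := ([] : List Int).length) (i := b)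
  simp only [List.length_nil] at h1 ⊢
  omega

theorem main_eq (N m : Int) (hm : m ≠ 0) :
    N_to_m_batches N m = N_to_m_batches_alt N m := by
  unfold N_to_m_batches N_to_m_batches_alt
  dsimp only
  rcases le_or_gt m 0 with hm0 | hm0
  · rw [PySem.List.pyRange_one_eq_nil hm0]; simp
  · set q := PySem.Int.floordiv N m with hq
    set r := PySem.Int.mod N m with hrdef
    have hr0 : 0 ≤ r := PySem.Int.mod_nonneg N hm0
    have hrm : r < m := PySem.Int.mod_lt N hm0
    have hNqr : q * m + r = N := PySem.Int.floordiv_mul_add_mod N m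
    have hmnat : ((m.toNat : Int)) = m := Int.toNat_of_nonneg (le_of_lt hm0)
    rw [← hmnat, loopA q r hr0 _ m.toNat]
    dsimp only
    apply List.map_congr_left
    intro i hi
    rw [hmnat] at hi
    have hi' := (PySem.List.mem_pyRange_one).mp hi
    congr 1
    rcases le_or_gt N 0 with hN | hN
    · -- N ≤ 0: the prebuilt list is empty, and both batches are empty
      have hq1 : q ≤ 0 := by nlinarith
      have hes : (i + 1) * q + min (i + 1) r ≤ i * q + min i r := by
        by_cases hqz : q = 0
        · have hrz : r = 0 := by
            have : r = N := by rw [← hNqr, hqz]; ring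
            omega
          simp only [hqz, hrz, mul_zero]
          omega
        · have : q ≤ -1 := by omega
          have hiq : (i + 1) * q = i * q + q := by ring
          omega
      rw [PySem.List.pyRange_one_eq_nil hN, slice_nil,
        PySem.List.pyRange_one_eq_nil hes]
    · -- N > 0
      have hq0 : 0 ≤ q := by
        by_contra h
        have : q ≤ -1 := by omega
        nlinarith
      rw [slice_range]
      · exact add_nonneg (mul_nonneg hi'.1 hq0) (le_min hi'.1 hr0)
      · have h1 : 0 ≤ (i + 1) * q := mul_nonneg (by omega) hq0
        have h2 : 0 ≤ min (i + 1) r := le_min (by omega) hr0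
        linarith
      · have h1 : (i + 1) * q ≤ q * m := by nlinarith
        have h2 : min (i + 1) r ≤ r := min_le_right _ _
        linarith

-- ===== VERDICT (by name: the statement is the Claim_ definition above) =====
theorem N_to_m_batches_spec : Claim_equal_N_to_m_batches := by
  intro N m _ hm
  exact main_eq N m hm
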